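-- pv_equiv track=rewrite | github.com/ma1371sao/LuaTblParser | PyLuaTblParser.py | eraseComment
-- ===== SOURCE A (Python) =====
-- def eraseComment(s):
--     erasedStr = ''
--     numQm = 0
--     start = -1
--     end = 0
--     i = 0
--     while i < len(s):
--         if numQm == 0:
--             if s[i] == '\"':
--                 numQm += 1
--             elif i + 1 < len(s) and s[i:i+2] == '--':
--                 start = i
--                 erasedStr += s[end:start]
--                 if i + 3 < len(s) and s[i:i+4] == '--[[':
--                     end = s.find(']]', i)
--                     if end == -1:
--                         end = len(s)
--                     else:
--                         end += 2
--                 else: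
--                     end = s.find('\n', i)
--                     if end == -1:
--                         end = len(s)
--                     else:
--                         end += 1
--                 i = end - 1
--         else:
--             if s[i] == '\"' and s[i - 1] != '\\':
--                 numQm -= 1
--         i += 1
--     erasedStr += s[end:len(s)]
--     return erasedStr
-- ===== SOURCE B (Python) =====
-- def eraseComment(s):
--     NORMAL, STRING, LINE, BLOCK = range(4)
--     out = []
--     mode = NORMAL
--     prev = ''
--     for i, c in enumerate(s):
--         if mode == NORMAL:
--             if c == '"':
--                 out.append(c)
--                 mode = STRING
--             elif s[i:i+2] == '--':
--                 mode = BLOCK if s[i:i+4] == '--[[' else LINE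
--             else:
--                 out.append(c)
--         elif mode == STRING:
--             out.append(c)
--             if c == '"' and prev != '\\':
--                 mode = NORMAL
--         elif mode == LINE:
--             if c == '\n':
--                 mode = NORMAL
--         else:  # BLOCK
--             if c == ']' and prev == ']':
--                 mode = NORMAL
--         prev = c
--     return ''.join(out)
-- ===== Notes on version B (the rewrite author's own statement) =====
-- stated objective: alternative
-- what changed: A scans with index jumps, using str.find to locate comment terminators and lazily copying uncommented spans via slices; B is a single-pass character-by-character finite-state machine (NORMAL/STRING/LINE/BLOCK modes) that emits each kept character immediately and leaves a comment mode when the newline or the closing bracket pair is consumed from the stream.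
import Mathlib
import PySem

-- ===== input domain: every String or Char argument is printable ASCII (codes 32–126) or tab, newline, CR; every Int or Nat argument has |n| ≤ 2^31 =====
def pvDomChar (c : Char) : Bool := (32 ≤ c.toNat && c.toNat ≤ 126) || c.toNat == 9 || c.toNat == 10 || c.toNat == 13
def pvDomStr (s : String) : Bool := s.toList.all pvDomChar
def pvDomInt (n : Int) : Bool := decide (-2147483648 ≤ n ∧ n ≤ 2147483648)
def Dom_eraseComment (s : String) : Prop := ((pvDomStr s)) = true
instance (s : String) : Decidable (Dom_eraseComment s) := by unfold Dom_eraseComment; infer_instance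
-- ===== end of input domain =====

-- B replaces A's jump-ahead scan (str.find + index jumps over a lazily copied string) by a
-- character-by-character finite-state machine (NORMAL/STRING/LINE/BLOCK) emitting kept
-- characters at once; same return value, different decomposition (objective: alternative).

-- ===== PORT A =====
-- Literal port of A's while loop: the index can jump forward, so the loop runs on fuel
-- (fuel = length of the string suffices: i strictly increases every iteration).
-- s[i] for 0 ≤ i < len is List.getD; s.find(sub, i) is PySem.Chars.findFrom;
-- slices are PySem.List.slice; s[i-1] (i may be 0 in Python, negative wrap) is pyGet?.
def eraseLoopA (cs : List Char) (fuel : Nat) (erased : List Char) (numQm : Int) (endPos : Nat) (i : Nat) : List Char :=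
  match fuel with
  | 0 => erased ++ PySem.List.slice cs (some (endPos : Int)) (some (cs.length : Int))
  | fuel + 1 =>
    if i < cs.length then
      if numQm = 0 then
        if cs.getD i ' ' = '"' then
          eraseLoopA cs fuel erased (numQm + 1) endPos (i + 1)
        else if i + 1 < cs.length ∧ PySem.List.slice cs (some (i : Int)) (some ((i : Int) + 2)) = ['-', '-'] then
          let start := i
          let erased' := erased ++ PySem.List.slice cs (some (endPos : Int)) (some (start : Int))
          if i + 3 < cs.length ∧ PySem.List.slice cs (some (i : Int)) (some ((i : Int) + 4)) = ['-', '-', '[', '['] then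
            let f := PySem.Chars.findFrom cs [']', ']'] (i : Int)
            let endPos' := if f = -1 then cs.length else f.toNat + 2
            eraseLoopA cs fuel erased' numQm endPos' (endPos' - 1 + 1)
          else
            let f := PySem.Chars.findFrom cs ['\n'] (i : Int)
            let endPos' := if f = -1 then cs.length else f.toNat + 1
            eraseLoopA cs fuel erased' numQm endPos' (endPos' - 1 + 1)
        else
          eraseLoopA cs fuel erased numQm endPos (i + 1)
      else
        if cs.getD i ' ' = '"' ∧ PySem.List.pyGet? cs ((i : Int) - 1) ≠ some '\\' then
          eraseLoopA cs fuel erased (numQm - 1) endPos (i + 1)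
        else
          eraseLoopA cs fuel erased numQm endPos (i + 1)
    else
      erased ++ PySem.List.slice cs (some (endPos : Int)) (some (cs.length : Int))

def eraseComment (s : String) : String :=
  String.ofList (eraseLoopA s.toList s.toList.length [] 0 0 0)

-- ===== PORT B =====
-- Literal port of B's for-loop FSM: mode 0=NORMAL, 1=STRING, 2=LINE, 3=BLOCK; prev is the
-- previous character as a Python string ('' or one char, hence List Char); Source B's lookahead
-- slices s[i:i+2]/s[i:i+4] are 'take 2'/'take 4' of the current suffix (the same values).
def fsmB (mode : Nat) (prev : List Char) (out : List Char) (rest : List Char) : List Char :=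
  match rest with
  | [] => out
  | c :: rest' =>
    if mode = 0 then
      if c = '"' then fsmB 1 [c] (out ++ [c]) rest'
      else if (c :: rest').take 2 = ['-', '-'] then
        fsmB (if (c :: rest').take 4 = ['-', '-', '[', '['] then 3 else 2) [c] out rest'
      else fsmB 0 [c] (out ++ [c]) rest'
    else if mode = 1 then
      fsmB (if c = '"' ∧ prev ≠ ['\\'] then 0 else 1) [c] (out ++ [c]) rest'
    else if mode = 2 then
      fsmB (if c = '\n' then 0 else 2) [c] out rest'
    else
      fsmB (if c = ']' ∧ prev = [']'] then 0 else 3) [c] out rest'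

def eraseComment_alt (s : String) : String :=
  String.ofList (fsmB 0 [] [] s.toList)

-- ===== PRECONDITION & SPEC =====
def Spec_eraseComment (s : String) (out : String) : Prop := out = eraseComment_alt s
instance (s : String) (out : String) : Decidable (Spec_eraseComment s out) := by unfold Spec_eraseComment; infer_instance

-- ===== CLAIM (what is proved, stated in full; the proofs are below) =====
def Claim_equal_eraseComment : Prop := ∀ (s : String), Dom_eraseComment s → Spec_eraseComment s (eraseComment s)

-- ===== LEMMAS AND PROOFS =====

-- fsmB's out parameter is a pure accumulator
theorem fsmB_out (rest : List Char) : ∀ (mode : Nat) (prev out : List Char),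
    fsmB mode prev out rest = out ++ fsmB mode prev [] rest := by
  induction rest with
  | nil => intro mode prev out; simp [fsmB]
  | cons c t ih =>
    intro mode prev out
    simp only [fsmB]
    split_ifs <;> (conv_lhs => rw [ih]) <;> (conv_rhs => rw [ih]) <;> simp

-- unfolding equations for PySem.Chars.find.go
theorem go_nil (sub : List Char) (k : Nat) :
    PySem.Chars.find.go sub [] k = if sub.isEmpty then (k : Int) else -1 := rfl

theorem go_cons (sub : List Char) (c : Char) (t : List Char) (k : Nat) :
    PySem.Chars.find.go sub (c :: t) k =
      if sub.isPrefixOf (c :: t) then (k : Int) else PySem.Chars.find.go sub t (k + 1) := rfl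

theorem go_ge (sub : List Char) (rest : List Char) : ∀ (j : Nat),
    PySem.Chars.find.go sub rest j = -1 ∨
      ∃ k : Nat, PySem.Chars.find.go sub rest j = (k : Int) ∧ j ≤ k := by
  induction rest with
  | nil =>
    intro j; rw [go_nil]
    by_cases h : sub.isEmpty <;> simp [h]
  | cons c t ih =>
    intro j; rw [go_cons]
    by_cases h : sub.isPrefixOf (c :: t)
    · exact Or.inr ⟨j, by simp [h]⟩
    · rcases ih (j + 1) with h1 | ⟨k, hk, hjk⟩
      · exact Or.inl (by simp [h, h1])
      · exact Or.inr ⟨k, by simp [h, hk], by omega⟩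

theorem go_shift (sub : List Char) (rest : List Char) : ∀ (j : Nat),
    PySem.Chars.find.go sub rest j =
      if PySem.Chars.find.go sub rest 0 = -1 then -1
      else (j : Int) + PySem.Chars.find.go sub rest 0 := by
  induction rest with
  | nil =>
    intro j; rw [go_nil, go_nil]
    by_cases h : sub.isEmpty <;> simp [h]
  | cons c t ih =>
    intro j; rw [go_cons, go_cons]
    by_cases h : sub.isPrefixOf (c :: t)
    · simp [h]
    · simp only [h, Bool.false_eq_true, if_false]
      rw [ih (j + 1), ih (0 + 1)]
      rcases go_ge sub t 0 with h0 | ⟨k, hk, _⟩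
      · simp [h0]
      · rw [hk]
        split_ifs <;> push_cast at * <;> omega

-- s.find(sub, i) for 0 ≤ i ≤ len and nonempty sub is find.go on the suffix
theorem findFrom_eq_go (cs sub : List Char) (i : Nat) (hi : i ≤ cs.length) :
    PySem.Chars.findFrom cs sub (i : Int) = PySem.Chars.find.go sub (cs.drop i) i := by
  rw [PySem.Chars.findFrom_natCast cs sub i hi]
  have hfind : PySem.Chars.find (cs.drop i) sub = PySem.Chars.find.go sub (cs.drop i) 0 := rfl
  rw [hfind, go_shift sub (cs.drop i) i]

theorem drop_cons_getD (cs : List Char) (i : Nat) (h : i < cs.length) :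
    cs.drop i = cs.getD i ' ' :: cs.drop (i + 1) := by
  rw [List.drop_eq_getElem_cons h, List.getD_eq_getElem cs ' ' h]

theorem take_snoc (cs : List Char) (endPos i : Nat) (h1 : endPos ≤ i) (h2 : i < cs.length) :
    (cs.drop endPos).take (i + 1 - endPos) = (cs.drop endPos).take (i - endPos) ++ [cs.getD i ' '] := by
  rw [show i + 1 - endPos = (i - endPos) + 1 by omega, List.take_add]
  congr 1
  rw [List.drop_drop, show endPos + (i - endPos) = i by omega, drop_cons_getD cs i h2]
  rfl

-- the exit value of A's loop (i ≥ len) matches the FSM value (which consumes nothing)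
theorem exit_val (cs : List Char) (i endPos : Nat) (hin : cs.length ≤ i) (m : Nat) (prev : List Char) :
    PySem.List.slice cs (some (endPos : Int)) (some ((cs.length : Nat) : Int)) =
      (cs.drop endPos).take (i - endPos) ++ fsmB m prev [] (cs.drop i) := by
  rw [PySem.List.slice_natCast, List.drop_eq_nil_of_le hin]
  have h1 : fsmB m prev [] [] = [] := rfl
  rw [h1, List.append_nil]
  rw [List.take_of_length_le (by rw [List.length_drop]),
      List.take_of_length_le (by rw [List.length_drop]; omega)]

-- walking a line comment in the FSM consumes exactly up to A's find('\n') + 1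
theorem line_walk (rest : List Char) : ∀ (j : Nat) (p : Char),
    fsmB 2 [p] [] rest =
      if PySem.Chars.find.go ['\n'] rest j = -1 then []
      else fsmB 0 ['\n'] [] (rest.drop ((PySem.Chars.find.go ['\n'] rest j).toNat + 1 - j)) := by
  induction rest with
  | nil => intro j p; simp [fsmB, go_nil]
  | cons c t ih =>
    intro j p
    rw [go_cons]
    by_cases h : c = '\n'
    · have hpre : List.isPrefixOf ['\n'] (c :: t) = true := by simp [List.isPrefixOf, h]
      simp only [hpre, if_true]
      have hne : ((j : Int)) ≠ -1 := by omega
      simp only [hne, if_false, fsmB, h]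
      norm_num
    · have hpre : List.isPrefixOf ['\n'] (c :: t) = false := by
        simp [List.isPrefixOf]
        exact fun hh => h hh.symm
      simp only [hpre, Bool.false_eq_true, if_false]
      have step : fsmB 2 [p] [] (c :: t) = fsmB 2 [c] [] t := by
        simp [fsmB, h]
      rw [step, ih (j + 1) c]
      rcases go_ge ['\n'] t (j + 1) with h0 | ⟨k, hk, hjk⟩
      · simp [h0]
      · rw [hk]
        have hne : (k : Int) ≠ -1 := by omega
        simp only [hne, if_false]
        rw [show (((k : Int)).toNat + 1 - j) = (((k : Int)).toNat + 1 - (j + 1)) + 1 by omega]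
        simp [List.drop_succ_cons]

-- walking a block comment: pairs (prev, c) in the FSM are exactly the positions A's find(']]') probes
theorem block_walk (rest : List Char) : ∀ (j : Nat) (p : Char),
    fsmB 3 [p] [] rest =
      if PySem.Chars.find.go [']', ']'] (p :: rest) j = -1 then []
      else fsmB 0 [']'] [] ((p :: rest).drop ((PySem.Chars.find.go [']', ']'] (p :: rest) j).toNat + 2 - j)) := by
  induction rest with
  | nil =>
    intro j p
    rw [go_cons]
    have hpre : List.isPrefixOf [']', ']'] [p] = false := by simp [List.isPrefixOf]
    simp [hpre, fsmB, go_nil]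
  | cons c t ih =>
    intro j p
    rw [go_cons]
    by_cases h : p = ']' ∧ c = ']'
    · have hpre : List.isPrefixOf [']', ']'] (p :: c :: t) = true := by
        simp [List.isPrefixOf, h.1, h.2]
      simp only [hpre, if_true]
      have hne : ((j : Int)) ≠ -1 := by omega
      simp only [hne, if_false]
      have step : fsmB 3 [p] [] (c :: t) = fsmB 0 [c] [] t := by
        simp [fsmB, h.1, h.2]
      rw [step, show ((j : Int)).toNat + 2 - j = 2 by omega]
      simp [h.2]
    · have hpre : List.isPrefixOf [']', ']'] (p :: c :: t) = false := by
        simp [List.isPrefixOf]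
        intro h1 h2
        exact h ⟨h1.symm, h2.symm⟩
      simp only [hpre, Bool.false_eq_true, if_false]
      have hcond : ¬(c = ']' ∧ p = ']') := fun hc => h ⟨hc.2, hc.1⟩
      have step : fsmB 3 [p] [] (c :: t) = fsmB 3 [c] [] t := by
        simp [fsmB, hcond]
      rw [step, ih (j + 1) c]
      rcases go_ge [']', ']'] (c :: t) (j + 1) with h0 | ⟨k, hk, hjk⟩
      · simp [h0]
      · rw [hk]
        have hne : (k : Int) ≠ -1 := by omega
        simp only [hne, if_false]
        rw [show (((k : Int)).toNat + 2 - j) = (((k : Int)).toNat + 2 - (j + 1)) + 1 by omega]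
        simp [List.drop_succ_cons]

-- step lemmas for the fsm (one character consumed, accumulator made explicit)
theorem fsm0_quote (c : Char) (r prev : List Char) (h : c = '"') :
    fsmB 0 prev [] (c :: r) = [c] ++ fsmB 1 [c] [] r := by
  conv_lhs => rw [fsmB]
  rw [if_pos rfl, if_pos h, fsmB_out]
  simp

theorem fsm0_plain (c : Char) (r prev : List Char) (h1 : ¬ c = '"') (h2 : ¬ (c :: r).take 2 = ['-', '-']) :
    fsmB 0 prev [] (c :: r) = [c] ++ fsmB 0 [c] [] r := by
  conv_lhs => rw [fsmB]
  rw [if_pos rfl, if_neg h1, if_neg h2, fsmB_out]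
  simp

theorem fsm0_comment (c : Char) (r prev : List Char) (h1 : ¬ c = '"') (h2 : (c :: r).take 2 = ['-', '-']) :
    fsmB 0 prev [] (c :: r) = fsmB (if (c :: r).take 4 = ['-', '-', '[', '['] then 3 else 2) [c] [] r := by
  conv_lhs => rw [fsmB]
  rw [if_pos rfl, if_neg h1, if_pos h2]

theorem fsm1_step (c : Char) (r prev : List Char) :
    fsmB 1 prev [] (c :: r) = [c] ++ fsmB (if c = '"' ∧ prev ≠ ['\\'] then 0 else 1) [c] [] r := by
  conv_lhs => rw [fsmB]
  rw [if_neg (by norm_num), if_pos rfl, fsmB_out]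
  simp

-- slice forms used by A's port, in drop/take form
theorem sliceEq (cs : List Char) (a b : Nat) :
    PySem.List.slice cs (some (a : Int)) (some (b : Int)) = (cs.drop a).take (b - a) :=
  PySem.List.slice_natCast cs a b

theorem slice2 (cs : List Char) (i : Nat) :
    PySem.List.slice cs (some (i : Int)) (some ((i : Int) + 2)) = (cs.drop i).take 2 := by
  have h := PySem.List.slice_natCast_add cs i 2
  push_cast at h
  exact h

theorem slice4 (cs : List Char) (i : Nat) :
    PySem.List.slice cs (some (i : Int)) (some ((i : Int) + 4)) = (cs.drop i).take 4 := by
  have h := PySem.List.slice_natCast_add cs i 4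
  push_cast at h
  exact h

-- step lemmas for A's loop (one iteration, with the branch conditions discharged)
theorem eA_quote (cs : List Char) (fuel : Nat) (erased : List Char) (endPos i : Nat)
    (hin : i < cs.length) (hq : cs.getD i ' ' = '"') :
    eraseLoopA cs (fuel + 1) erased 0 endPos i = eraseLoopA cs fuel erased 1 endPos (i + 1) := by
  conv_lhs => rw [eraseLoopA]
  rw [if_pos hin, if_pos rfl, if_pos hq]
  norm_num

theorem eA_plain (cs : List Char) (fuel : Nat) (erased : List Char) (endPos i : Nat)
    (hin : i < cs.length) (hq : ¬ cs.getD i ' ' = '"')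
    (hC : ¬ (i + 1 < cs.length ∧ PySem.List.slice cs (some (i : Int)) (some ((i : Int) + 2)) = ['-', '-'])) :
    eraseLoopA cs (fuel + 1) erased 0 endPos i = eraseLoopA cs fuel erased 0 endPos (i + 1) := by
  conv_lhs => rw [eraseLoopA]
  rw [if_pos hin, if_pos rfl, if_neg hq, if_neg hC]

theorem eA_block (cs : List Char) (fuel : Nat) (erased : List Char) (endPos i : Nat)
    (hin : i < cs.length) (hq : ¬ cs.getD i ' ' = '"')
    (hC : i + 1 < cs.length ∧ PySem.List.slice cs (some (i : Int)) (some ((i : Int) + 2)) = ['-', '-'])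
    (hB : i + 3 < cs.length ∧ PySem.List.slice cs (some (i : Int)) (some ((i : Int) + 4)) = ['-', '-', '[', '['])
    (e : Nat)
    (he : e = if PySem.Chars.findFrom cs [']', ']'] (i : Int) = -1 then cs.length
              else (PySem.Chars.findFrom cs [']', ']'] (i : Int)).toNat + 2) :
    eraseLoopA cs (fuel + 1) erased 0 endPos i =
      eraseLoopA cs fuel (erased ++ PySem.List.slice cs (some (endPos : Int)) (some (i : Int))) 0 e (e - 1 + 1) := by
  subst he
  conv_lhs => rw [eraseLoopA]
  rw [if_pos hin, if_pos rfl, if_neg hq, if_pos hC]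
  dsimp only
  rw [if_pos hB]

theorem eA_line (cs : List Char) (fuel : Nat) (erased : List Char) (endPos i : Nat)
    (hin : i < cs.length) (hq : ¬ cs.getD i ' ' = '"')
    (hC : i + 1 < cs.length ∧ PySem.List.slice cs (some (i : Int)) (some ((i : Int) + 2)) = ['-', '-'])
    (hB : ¬ (i + 3 < cs.length ∧ PySem.List.slice cs (some (i : Int)) (some ((i : Int) + 4)) = ['-', '-', '[', '[']))
    (e : Nat)
    (he : e = if PySem.Chars.findFrom cs ['\n'] (i : Int) = -1 then cs.length
              else (PySem.Chars.findFrom cs ['\n'] (i : Int)).toNat + 1) :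
    eraseLoopA cs (fuel + 1) erased 0 endPos i =
      eraseLoopA cs fuel (erased ++ PySem.List.slice cs (some (endPos : Int)) (some (i : Int))) 0 e (e - 1 + 1) := by
  subst he
  conv_lhs => rw [eraseLoopA]
  rw [if_pos hin, if_pos rfl, if_neg hq, if_pos hC]
  dsimp only
  rw [if_neg hB]

theorem eA_sclose (cs : List Char) (fuel : Nat) (erased : List Char) (endPos i : Nat)
    (hin : i < cs.length)
    (hc : cs.getD i ' ' = '"' ∧ PySem.List.pyGet? cs ((i : Int) - 1) ≠ some '\\') :
    eraseLoopA cs (fuel + 1) erased 1 endPos i = eraseLoopA cs fuel erased 0 endPos (i + 1) := by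
  conv_lhs => rw [eraseLoopA]
  rw [if_pos hin, if_neg (by norm_num), if_pos hc]
  norm_num

theorem eA_skeep (cs : List Char) (fuel : Nat) (erased : List Char) (endPos i : Nat)
    (hin : i < cs.length)
    (hc : ¬ (cs.getD i ' ' = '"' ∧ PySem.List.pyGet? cs ((i : Int) - 1) ≠ some '\\')) :
    eraseLoopA cs (fuel + 1) erased 1 endPos i = eraseLoopA cs fuel erased 1 endPos (i + 1) := by
  conv_lhs => rw [eraseLoopA]
  rw [if_pos hin, if_neg (by norm_num), if_neg hc]

-- the main invariant: A's lazily-copied state (erased, numQm, endPos, i) against B's FSM at index i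
theorem main_inv (cs : List Char) (fuel : Nat) : ∀ (i endPos : Nat) (erased : List Char),
    cs.length - i ≤ fuel → endPos ≤ i →
    (∀ prev, eraseLoopA cs fuel erased 0 endPos i =
        erased ++ (cs.drop endPos).take (i - endPos) ++ fsmB 0 prev [] (cs.drop i))
    ∧ (1 ≤ i → eraseLoopA cs fuel erased 1 endPos i =
        erased ++ (cs.drop endPos).take (i - endPos) ++ fsmB 1 [cs.getD (i - 1) ' '] [] (cs.drop i)) := by
  induction fuel with
  | zero =>
    intro i endPos erased hfuel hle
    have hin : cs.length ≤ i := by omega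
    constructor
    · intro prev
      conv_lhs => rw [eraseLoopA]
      rw [exit_val cs i endPos hin 0 prev, List.append_assoc]
    · intro _
      conv_lhs => rw [eraseLoopA]
      rw [exit_val cs i endPos hin 1 _, List.append_assoc]
  | succ fuel ih =>
    intro i endPos erased hfuel hle
    by_cases hin : i < cs.length
    case neg =>
      have hin' : cs.length ≤ i := by omega
      constructor
      · intro prev
        conv_lhs => rw [eraseLoopA]
        rw [if_neg hin, exit_val cs i endPos hin' 0 prev, List.append_assoc]
      · intro _
        conv_lhs => rw [eraseLoopA]
        rw [if_neg hin, exit_val cs i endPos hin' 1 _, List.append_assoc]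
    case pos =>
      have hdrop : cs.drop i = cs.getD i ' ' :: cs.drop (i + 1) := drop_cons_getD cs i hin
      constructor
      · -- NORMAL mode / numQm = 0
        intro prev
        by_cases hq : cs.getD i ' ' = '"'
        · -- opening quote
          rw [eA_quote cs fuel erased endPos i hin hq,
              (ih (i + 1) endPos erased (by omega) (by omega)).2 (by omega)]
          rw [hdrop, fsm0_quote _ _ prev hq, take_snoc cs endPos i hle hin]
          simp
        · by_cases hC : (cs.drop i).take 2 = ['-', '-']
          · -- a comment starts here
            have hc2 : i + 1 < cs.length := by
              have hlen := congrArg List.length hC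
              rw [List.length_take, List.length_drop] at hlen
              simp at hlen; omega
            by_cases hB : (cs.drop i).take 4 = ['-', '-', '[', '[']
            · -- block comment
              have hc4 : i + 3 < cs.length := by
                have hlen := congrArg List.length hB
                rw [List.length_take, List.length_drop] at hlen
                simp at hlen; omega
              have hgo : PySem.Chars.findFrom cs [']', ']'] (i : Int) =
                  PySem.Chars.find.go [']', ']'] (cs.drop i) i := findFrom_eq_go cs _ i (by omega)
              -- B side: enter mode 3, then block_walk
              rw [hdrop, fsm0_comment _ _ prev hq (by rw [← hdrop]; exact hC)]
              rw [if_pos (by rw [← hdrop]; exact hB)]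
              rw [block_walk (cs.drop (i + 1)) i (cs.getD i ' '), ← hdrop]
              rcases go_ge [']', ']'] (cs.drop i) i with h0 | ⟨k, hk, hik⟩
              · -- not found: comment to end of string
                have hfe : PySem.Chars.findFrom cs [']', ']'] (i : Int) = -1 := by rw [hgo, h0]
                rw [eA_block cs fuel erased endPos i hin hq
                      ⟨hc2, by rw [slice2]; exact hC⟩ ⟨hc4, by rw [slice4]; exact hB⟩
                      cs.length (by rw [if_pos hfe]),
                    show cs.length - 1 + 1 = cs.length by omega]
                rw [((ih cs.length cs.length _ (by omega) (le_refl _)).1 [']']),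
                    sliceEq cs endPos i, h0]
                simp [fsmB]
              · -- found at k: comment ends after s[k+1]
                have hfe : PySem.Chars.findFrom cs [']', ']'] (i : Int) = (k : Int) := by rw [hgo, hk]
                rw [eA_block cs fuel erased endPos i hin hq
                      ⟨hc2, by rw [slice2]; exact hC⟩ ⟨hc4, by rw [slice4]; exact hB⟩
                      (k + 2) (by rw [if_neg (by rw [hfe]; omega)]; rw [hfe]; simp),
                    show k + 2 - 1 + 1 = k + 2 by omega]
                rw [((ih (k + 2) (k + 2) _ (by omega) (le_refl _)).1 [']']),
                    sliceEq cs endPos i, hk]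
                have hne : ((k : Int)) ≠ -1 := by omega
                rw [if_neg hne]
                rw [List.drop_drop, show i + (((k : Int)).toNat + 2 - i) = k + 2 by omega]
                simp
            · -- line comment
              have hcdash : cs.getD i ' ' = '-' := by
                rw [hdrop] at hC
                simp at hC
                exact hC.1
              have hgo : PySem.Chars.findFrom cs ['\n'] (i : Int) =
                  PySem.Chars.find.go ['\n'] (cs.drop (i + 1)) (i + 1) := by
                rw [findFrom_eq_go cs _ i (by omega), hdrop, go_cons,
                    if_neg (by rw [hcdash]; simp [List.isPrefixOf])]
              -- B side: enter mode 2, then line_walk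
              rw [hdrop, fsm0_comment _ _ prev hq (by rw [← hdrop]; exact hC)]
              rw [if_neg (by rw [← hdrop]; exact hB)]
              rw [line_walk (cs.drop (i + 1)) (i + 1) (cs.getD i ' ')]
              rcases go_ge ['\n'] (cs.drop (i + 1)) (i + 1) with h0 | ⟨k, hk, hik⟩
              · have hfe : PySem.Chars.findFrom cs ['\n'] (i : Int) = -1 := by rw [hgo, h0]
                rw [eA_line cs fuel erased endPos i hin hq
                      ⟨hc2, by rw [slice2]; exact hC⟩ (by rw [slice4]; tauto)
                      cs.length (by rw [if_pos hfe]),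
                    show cs.length - 1 + 1 = cs.length by omega]
                rw [((ih cs.length cs.length _ (by omega) (le_refl _)).1 ['\n']),
                    sliceEq cs endPos i, h0]
                simp [fsmB]
              · have hfe : PySem.Chars.findFrom cs ['\n'] (i : Int) = (k : Int) := by rw [hgo, hk]
                rw [eA_line cs fuel erased endPos i hin hq
                      ⟨hc2, by rw [slice2]; exact hC⟩ (by rw [slice4]; tauto)
                      (k + 1) (by rw [if_neg (by rw [hfe]; omega)]; rw [hfe]; simp),
                    show k + 1 - 1 + 1 = k + 1 by omega]
                rw [((ih (k + 1) (k + 1) _ (by omega) (le_refl _)).1 ['\n']),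
                    sliceEq cs endPos i, hk]
                have hne : ((k : Int)) ≠ -1 := by omega
                rw [if_neg hne]
                rw [List.drop_drop, show i + 1 + (((k : Int)).toNat + 1 - (i + 1)) = k + 1 by omega]
                simp
          · -- ordinary character: copied through
            rw [eA_plain cs fuel erased endPos i hin hq (by rw [slice2]; tauto),
                ((ih (i + 1) endPos erased (by omega) (by omega)).1 [cs.getD i ' '])]
            rw [hdrop, fsm0_plain _ _ prev hq (by rw [← hdrop]; exact hC),
                take_snoc cs endPos i hle hin]
            simp
      · -- STRING mode / numQm = 1
        intro hi1
        have hprev : PySem.List.pyGet? cs ((i : Int) - 1) = some (cs.getD (i - 1) ' ') := by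
          rw [show ((i : Int) - 1) = ((i - 1 : Nat) : Int) by omega, PySem.List.pyGet?_natCast,
              List.getElem?_eq_getElem (by omega), List.getD_eq_getElem cs ' ' (by omega)]
        by_cases hcl : cs.getD i ' ' = '"' ∧ ¬ cs.getD (i - 1) ' ' = '\\'
        · -- closing quote
          rw [eA_sclose cs fuel erased endPos i hin
                ⟨hcl.1, by rw [hprev]; simpa using hcl.2⟩,
              ((ih (i + 1) endPos erased (by omega) (by omega)).1 [cs.getD i ' '])]
          rw [hdrop, fsm1_step _ _ _, if_pos ⟨hcl.1, by simpa using hcl.2⟩,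
              take_snoc cs endPos i hle hin]
          simp
        · -- stay in the string
          have hcl' : ¬ (cs.getD i ' ' = '"' ∧ PySem.List.pyGet? cs ((i : Int) - 1) ≠ some '\\') := by
            rw [hprev]
            intro hx
            exact hcl ⟨hx.1, fun hy => hx.2 (by rw [hy])⟩
          rw [eA_skeep cs fuel erased endPos i hin hcl',
              (ih (i + 1) endPos erased (by omega) (by omega)).2 (by omega)]
          rw [hdrop, fsm1_step _ _ _,
              if_neg (by intro hx; exact hcl ⟨hx.1, by simpa using hx.2⟩),
              take_snoc cs endPos i hle hin]
          simp

theorem eraseComment_eq (s : String) : eraseComment s = eraseComment_alt s := by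
  unfold eraseComment eraseComment_alt
  have h := (main_inv s.toList s.toList.length 0 0 [] (by omega) (by omega)).1 []
  simp only [Nat.sub_self, List.take_zero, List.drop_zero, List.nil_append, List.append_nil] at h
  rw [h]

-- ===== VERDICT (by name: the statement is the Claim_ definition above) =====
theorem eraseComment_spec : Claim_equal_eraseComment := by
  intro s _
  unfold Spec_eraseComment
  exact eraseComment_eq s
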